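-- pv_equiv track=rewrite | github.com/kevingrillet/Py-AdventOfCode | 2016/02/main.py | part_two
-- ===== SOURCE A (Python) =====
-- keypad2 = [
--          ['', '',   '1', '',   ''],
--          ['',  '2', '3', '4',  ''],
--          ['5', '6', '7', '8', '9'],
--          ['',  'A', 'B', 'C',  ''],
--          ['',   '', 'D',  '',  ''],
-- ]
--
-- def part_two(inpt: list[str]) -> str:
--     pos = [2, 0]
--     result = ''
--     for line in inpt:
--         for move in line:
--             new_pos = pos
--             if move == 'U':
--                 new_pos = [pos[0] - 1, pos[1]]
--             elif move == 'D':
--                 new_pos = [pos[0] + 1, pos[1]]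
--             elif move == 'L':
--                 new_pos = [pos[0], pos[1] - 1]
--             elif move == 'R':
--                 new_pos = [pos[0], pos[1] + 1]
--
--             if -1 < new_pos[0] < len(keypad2) and -1 < new_pos[1] < len(keypad2[0])\
--                     and keypad2[new_pos[0]][new_pos[1]] != '':
--                 pos = new_pos
--
--         result += keypad2[pos[0]][pos[1]]
--
--     return result
-- ===== SOURCE B (Python) =====
-- # B: precomputed adjacency table on button characters instead of coordinate simulation.
-- ADJ = {
--     '1': {'D': '3'},
--     '2': {'R': '3', 'D': '6'},
--     '3': {'U': '1', 'L': '2', 'R': '4', 'D': '7'},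
--     '4': {'L': '3', 'D': '8'},
--     '5': {'R': '6'},
--     '6': {'U': '2', 'L': '5', 'R': '7', 'D': 'A'},
--     '7': {'U': '3', 'L': '6', 'R': '8', 'D': 'B'},
--     '8': {'U': '4', 'L': '7', 'R': '9', 'D': 'C'},
--     '9': {'L': '8'},
--     'A': {'U': '6', 'R': 'B'},
--     'B': {'U': '7', 'L': 'A', 'R': 'C', 'D': 'D'},
--     'C': {'U': '8', 'L': 'B'},
--     'D': {'U': 'B'},
-- }
--
-- def part_two(inpt: list[str]) -> str:
--     cur = '5'
--     out = []
--     for line in inpt: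
--         for move in line:
--             cur = ADJ[cur].get(move, cur)
--         out.append(cur)
--     return ''.join(out)
-- ===== Notes on version B (the rewrite author's own statement) =====
-- stated objective: idiomatic
-- what changed: Replaces the coordinate simulation over a 5x5 grid (mutable [row,col] position, fresh list allocations and bounds-and-blank checks on every move) by a precomputed character-level adjacency table: the current button is a character and each move is a single dict lookup defaulting to staying put.
import Mathlib
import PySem

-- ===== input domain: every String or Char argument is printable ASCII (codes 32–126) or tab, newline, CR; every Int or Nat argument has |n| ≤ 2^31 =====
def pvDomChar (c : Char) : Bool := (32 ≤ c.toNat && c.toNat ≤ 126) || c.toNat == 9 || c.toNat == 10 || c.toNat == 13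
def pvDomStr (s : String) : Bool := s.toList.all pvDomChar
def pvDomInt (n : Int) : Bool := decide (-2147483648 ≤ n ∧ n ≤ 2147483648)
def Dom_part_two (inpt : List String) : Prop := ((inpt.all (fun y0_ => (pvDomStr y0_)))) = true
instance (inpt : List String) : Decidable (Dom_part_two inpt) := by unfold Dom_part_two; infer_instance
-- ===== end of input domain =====

-- B replaces A's coordinate simulation over a 5×5 grid by a precomputed character-level
-- adjacency table ('idiomatic' objective; same asymptotic cost).

-- ===== PORT A =====
-- keypad cells are modelled as List Char ('' = []), a faithful representation of Python str.
def keypad2 : List (List (List Char)) :=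
  [ [[],  [],   ['1'], [],   []],
    [[],  ['2'], ['3'], ['4'], []],
    [['5'], ['6'], ['7'], ['8'], ['9']],
    [[],  ['A'], ['B'], ['C'], []],
    [[],  [],   ['D'], [],   []] ]

-- keypad2[i][j]; inside A the indices are always bounds-checked first, so pyGet? is some there.
def keypadCell (i j : Int) : List Char :=
  (PySem.List.pyGet? ((PySem.List.pyGet? keypad2 i).getD []) j).getD []

-- inner-loop body of A
def partTwoStep (pos : Int × Int) (move : Char) : Int × Int :=
  let new_pos :=
    if move = 'U' then (pos.1 - 1, pos.2)
    else if move = 'D' then (pos.1 + 1, pos.2)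
    else if move = 'L' then (pos.1, pos.2 - 1)
    else if move = 'R' then (pos.1, pos.2 + 1)
    else pos
  if (-1 < new_pos.1 ∧ new_pos.1 < (keypad2.length : Int)) ∧
     (-1 < new_pos.2 ∧ new_pos.2 < ((keypad2.getD 0 []).length : Int)) ∧
     keypadCell new_pos.1 new_pos.2 ≠ [] then new_pos else pos

def part_two (inpt : List String) : String :=
  String.ofList (inpt.foldl
    (fun (st : (Int × Int) × List Char) line =>
      let pos := line.toList.foldl partTwoStep st.1
      (pos, st.2 ++ keypadCell pos.1 pos.2))
    ((2, 0), [])).2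

-- ===== PORT B =====
def adjTable : PySem.Dict Char (PySem.Dict Char Char) :=
  PySem.Dict.mk
    [ ('1', PySem.Dict.mk [('D', '3')]),
      ('2', PySem.Dict.mk [('R', '3'), ('D', '6')]),
      ('3', PySem.Dict.mk [('U', '1'), ('L', '2'), ('R', '4'), ('D', '7')]),
      ('4', PySem.Dict.mk [('L', '3'), ('D', '8')]),
      ('5', PySem.Dict.mk [('R', '6')]),
      ('6', PySem.Dict.mk [('U', '2'), ('L', '5'), ('R', '7'), ('D', 'A')]),
      ('7', PySem.Dict.mk [('U', '3'), ('L', '6'), ('R', '8'), ('D', 'B')]),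
      ('8', PySem.Dict.mk [('U', '4'), ('L', '7'), ('R', '9'), ('D', 'C')]),
      ('9', PySem.Dict.mk [('L', '8')]),
      ('A', PySem.Dict.mk [('U', '6'), ('R', 'B')]),
      ('B', PySem.Dict.mk [('U', '7'), ('L', 'A'), ('R', 'C'), ('D', 'D')]),
      ('C', PySem.Dict.mk [('U', '8'), ('L', 'B')]),
      ('D', PySem.Dict.mk [('U', 'B')]) ]

-- ADJ[cur].get(move, cur); cur is always a key of ADJ, so the getD .empty totality guard never fires.
def adjStep (cur : Char) (move : Char) : Char :=
  ((PySem.Dict.get? adjTable cur).getD PySem.Dict.empty).getD move cur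

def part_two_alt (inpt : List String) : String :=
  String.ofList (inpt.foldl
    (fun (st : Char × List Char) line =>
      let cur := line.toList.foldl adjStep st.1
      (cur, st.2 ++ [cur]))
    ('5', [])).2

-- ===== PRECONDITION & SPEC =====
def Spec_part_two (inpt : List String) (out : String) : Prop := out = part_two_alt inpt
instance (inpt : List String) (out : String) : Decidable (Spec_part_two inpt out) := by unfold Spec_part_two; infer_instance

-- ===== CLAIM (what is proved, stated in full; the proofs are below) =====
def Claim_equal_part_two : Prop := ∀ (inpt : List String), Dom_part_two inpt → Spec_part_two inpt (part_two inpt)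

-- ===== LEMMAS AND PROOFS =====

-- the 13 reachable coordinates of A and the button character at each
def validPos : List (Int × Int) :=
  [(0,2), (1,1), (1,2), (1,3), (2,0), (2,1), (2,2), (2,3), (2,4), (3,1), (3,2), (3,3), (4,2)]

def charOf (p : Int × Int) : Char := (keypadCell p.1 p.2).headD ' '

theorem cell_eq (p : Int × Int) (hp : p ∈ validPos) :
    keypadCell p.1 p.2 = [charOf p] := by
  fin_cases hp <;> decide

theorem adjStep_default (cur c : Char) (hU : c ≠ 'U') (hD : c ≠ 'D') (hL : c ≠ 'L') (hR : c ≠ 'R') :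
    adjStep cur c = cur := by
  have hU' := Ne.symm hU; have hD' := Ne.symm hD; have hL' := Ne.symm hL; have hR' := Ne.symm hR
  unfold adjStep
  rcases hg : PySem.Dict.get? adjTable cur with _ | d
  · simp [PySem.Dict.getD_empty]
  · have hm := PySem.Dict.mem_items_of_get?_eq_some _ hg
    simp only [adjTable] at hm
    fin_cases hm <;>
      simp [PySem.Dict.getD, PySem.Dict.get?, hU', hD', hL', hR']

theorem step_corr (p : Int × Int) (hp : p ∈ validPos) (c : Char) :
    partTwoStep p c ∈ validPos ∧ adjStep (charOf p) c = charOf (partTwoStep p c) := by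
  fin_cases hp <;>
  · by_cases hU : c = 'U'
    · subst hU; decide
    by_cases hD : c = 'D'
    · subst hD; decide
    by_cases hL : c = 'L'
    · subst hL; decide
    by_cases hR : c = 'R'
    · subst hR; decide
    have hA : ∀ q : Int × Int, q ∈ validPos → partTwoStep q c = q := by
      intro q hq
      fin_cases hq <;> simp [partTwoStep, hU, hD, hL, hR]
    rw [hA _ (by decide), adjStep_default _ _ hU hD hL hR]
    exact ⟨by decide, rfl⟩

theorem inner_corr (cs : List Char) (p : Int × Int) (hp : p ∈ validPos) :
    cs.foldl partTwoStep p ∈ validPos ∧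
    cs.foldl adjStep (charOf p) = charOf (cs.foldl partTwoStep p) := by
  induction cs generalizing p with
  | nil => exact ⟨hp, rfl⟩
  | cons c cs ih =>
    obtain ⟨h1, h2⟩ := step_corr p hp c
    simpa [List.foldl_cons, h2] using ih (partTwoStep p c) h1

theorem outer_corr (lines : List String) (p : Int × Int) (hp : p ∈ validPos) (acc : List Char) :
    (lines.foldl
      (fun (st : (Int × Int) × List Char) line =>
        let pos := line.toList.foldl partTwoStep st.1
        (pos, st.2 ++ keypadCell pos.1 pos.2)) (p, acc)).2 =
    (lines.foldl
      (fun (st : Char × List Char) line =>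
        let cur := line.toList.foldl adjStep st.1
        (cur, st.2 ++ [cur])) (charOf p, acc)).2 := by
  induction lines generalizing p acc with
  | nil => rfl
  | cons line rest ih =>
    obtain ⟨h1, h2⟩ := inner_corr line.toList p hp
    simp only [List.foldl_cons, h2, cell_eq _ h1]
    exact ih _ h1 _

-- ===== VERDICT (by name: the statement is the Claim_ definition above) =====
theorem part_two_spec : Claim_equal_part_two := by
  intro inpt _
  unfold Spec_part_two part_two part_two_alt
  have h5 : charOf (2, 0) = '5' := by decide
  rw [← h5]
  exact congrArg String.ofList (outer_corr inpt (2, 0) (by decide) [])
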